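-- pv_equiv track=rewrite | github.com/MrBrantCode/unitest_baseline | mut_generate/mist_train_cf/cf_17804/solution.py | contains_two_odd_primes
-- ===== SOURCE A (Python) =====
-- def contains_two_odd_primes(arr):
--     def is_prime(num):
--         if num < 2:
--             return False
--         for i in range(2, int(num/2) + 1):
--             if num % i == 0:
--                 return False
--         return True
--
--     odd_prime_count = 0
--     for num in arr:
--         if num > 1 and num % 2 != 0 and is_prime(num):
--             odd_prime_count += 1
--             if odd_prime_count >= 2:
--                 return True
--     return False
-- ===== SOURCE B (Python) =====
-- def contains_two_odd_primes(arr):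
--     def is_odd_prime(n):
--         if n < 3 or n % 2 == 0:
--             return False
--         d = 3
--         while d * d <= n:
--             if n % d == 0:
--                 return False
--             d += 2
--         return True
--
--     matches = (x for x in arr if is_odd_prime(x))
--     return next(matches, None) is not None and next(matches, None) is not None
-- ===== Notes on version B (the rewrite author's own statement) =====
-- stated objective: faster
-- what changed: B's primality test does trial division only by odd d with d*d <= n (O(sqrt m) per element) instead of A's scan of every i in 2..num//2 (O(m)), and the outer counting loop becomes a generator filtered once with two next() calls (find a first match, then a second).
import Mathlib
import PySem

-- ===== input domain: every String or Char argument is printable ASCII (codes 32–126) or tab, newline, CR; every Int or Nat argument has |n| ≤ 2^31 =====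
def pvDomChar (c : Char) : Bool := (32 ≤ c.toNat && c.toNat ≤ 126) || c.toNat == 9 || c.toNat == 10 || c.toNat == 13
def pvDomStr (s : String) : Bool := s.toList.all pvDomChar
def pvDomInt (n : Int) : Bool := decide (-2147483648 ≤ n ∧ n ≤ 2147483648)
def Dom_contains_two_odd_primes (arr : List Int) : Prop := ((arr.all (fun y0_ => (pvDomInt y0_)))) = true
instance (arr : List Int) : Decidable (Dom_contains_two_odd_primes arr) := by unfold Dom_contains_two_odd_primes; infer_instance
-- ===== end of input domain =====

-- B replaces A's O(m) half-range trial division by an O(√m) odd-step trial division and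
-- restructures the outer counting loop as "find a first match, then a second" (objective: faster).

-- ===== PORT A =====
-- A's inner is_prime: num < 2 check, then trial division over range(2, int(num/2)+1)
-- (int(num/2) is truncating division: PySem.Int.truncdiv; the loop's early `return False`
-- on a divisor is List.all with short-circuit).
def pvIsPrimeA (num : Int) : Bool :=
  if num < 2 then false
  else (PySem.List.pyRange 2 (PySem.Int.truncdiv num 2 + 1) 1).all
        (fun i => PySem.Int.mod num i != 0)

-- A's outer loop with its counter and early `return True`.
def pvLoopA : List Int → Int → Bool
  | [], _ => false
  | num :: rest, count =>
    if num > 1 ∧ PySem.Int.mod num 2 ≠ 0 ∧ pvIsPrimeA num then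
      if count + 1 ≥ 2 then true else pvLoopA rest (count + 1)
    else pvLoopA rest count

def contains_two_odd_primes (arr : List Int) : Bool := pvLoopA arr 0

-- ===== PORT B =====
-- Termination measure for the √n trial-division loop (cited by name in pvTrialB's decreasing_by).
theorem pvTrialDec (n d : Int) (h : d * d ≤ n) : (n + 1 - (d + 2)).toNat < (n + 1 - d).toNat := by
  have h2 : 0 ≤ d * d := mul_self_nonneg d
  have h1 : 2 * d - 1 ≤ n := by nlinarith [sq_nonneg (d - 1), h]
  omega

-- B's while-loop: trial division by odd d with d*d ≤ n.
def pvTrialB (n d : Int) : Bool :=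
  if d * d ≤ n then
    if PySem.Int.mod n d == 0 then false else pvTrialB n (d + 2)
  else true
termination_by (n + 1 - d).toNat
decreasing_by
  rename_i h1 h2
  exact pvTrialDec n d h1

def pvIsOddPrimeB (n : Int) : Bool :=
  if n < 3 ∨ PySem.Int.mod n 2 == 0 then false else pvTrialB n 3

-- B's generator: `next` = find the first element passing the filter, returning the rest.
def pvFindB : List Int → Option (List Int)
  | [] => none
  | x :: xs => if pvIsOddPrimeB x then some xs else pvFindB xs

def contains_two_odd_primes_alt (arr : List Int) : Bool :=
  match pvFindB arr with
  | none => false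
  | some rest => (pvFindB rest).isSome

-- ===== PRECONDITION & SPEC =====
def Spec_contains_two_odd_primes (arr : List Int) (out : Bool) : Prop := out = contains_two_odd_primes_alt arr
instance (arr : List Int) (out : Bool) : Decidable (Spec_contains_two_odd_primes arr out) := by unfold Spec_contains_two_odd_primes; infer_instance

-- ===== CLAIM (what is proved, stated in full; the proofs are below) =====
def Claim_equal_contains_two_odd_primes : Prop := ∀ (arr : List Int), Dom_contains_two_odd_primes arr → Spec_contains_two_odd_primes arr (contains_two_odd_primes arr)

-- ===== LEMMAS AND PROOFS =====

-- "n has no proper divisor": the common characterisation both primality tests are reduced to.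
def pvNoDiv (n : Int) : Prop := ∀ d : Int, 2 ≤ d → d < n → ¬ d ∣ n

-- A's test, for n ≥ 3, decides pvNoDiv.
theorem pvIsPrimeA_iff (n : Int) (h3 : 3 ≤ n) :
    pvIsPrimeA n = true ↔ pvNoDiv n := by
  have ht : PySem.Int.truncdiv n 2 = n / 2 := by
    simpa [PySem.Int.truncdiv] using Int.tdiv_eq_ediv_of_nonneg (a := n) (b := 2) (by omega)
  have hn2 : ¬ n < 2 := by omega
  rw [pvIsPrimeA, if_neg hn2]
  simp only [List.all_eq_true, PySem.List.mem_pyRange_one, bne_iff_ne, ne_eq,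
    PySem.Int.mod_eq_zero_iff_dvd, ht]
  constructor
  · intro h d hd2 hdn hdvd
    obtain ⟨c, hc⟩ := hdvd
    have hc2 : 2 ≤ c := by
      by_contra hcon
      have h1 : c ≤ 1 := by omega
      have h' : d * c ≤ d * 1 := mul_le_mul_of_nonneg_left h1 (by omega)
      rw [mul_one] at h'
      omega
    have hd' : d * 2 ≤ d * c := mul_le_mul_of_nonneg_left hc2 (by omega)
    have hdn2 : d * 2 ≤ n := by rw [hc]; exact hd'
    exact h d ⟨hd2, by omega⟩ ⟨c, hc⟩
  · intro h i hi
    exact h i hi.1 (by omega)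

-- B's trial loop returns false as soon as some odd divisor m ≥ d with m*m ≤ n exists.
theorem pvTrialB_false (n d m : Int) (hd1 : 1 ≤ d) (hdodd : d % 2 = 1) (hmodd : m % 2 = 1)
    (hdm : d ≤ m) (hmm : m * m ≤ n) (hdvd : m ∣ n) : pvTrialB n d = false := by
  have hdd : d * d ≤ n :=
    le_trans (mul_le_mul hdm hdm (by omega) (by omega)) hmm
  rw [pvTrialB, if_pos hdd]
  by_cases hdiv : (PySem.Int.mod n d == 0) = true
  · rw [if_pos hdiv]
  · rw [if_neg hdiv]
    have hndvd : ¬ d ∣ n := by simpa [PySem.Int.mod_eq_zero_iff_dvd] using hdiv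
    have hne : m ≠ d := fun he => hndvd (he ▸ hdvd)
    exact pvTrialB_false n (d + 2) m (by omega) (by omega) hmodd (by omega) hmm hdvd
termination_by (n + 1 - d).toNat
decreasing_by exact pvTrialDec n d hdd

-- B's trial loop returns true when no odd m ≥ d with m*m ≤ n divides n.
theorem pvTrialB_true (n d : Int)
    (h : ∀ m : Int, d ≤ m → m % 2 = 1 → m * m ≤ n → ¬ m ∣ n)
    (hdodd : d % 2 = 1) : pvTrialB n d = true := by
  rw [pvTrialB]
  by_cases hg : d * d ≤ n
  · rw [if_pos hg]
    have hndvd : ¬ d ∣ n := h d le_rfl hdodd hg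
    have hmod : ¬ (PySem.Int.mod n d == 0) = true := by
      simpa [PySem.Int.mod_eq_zero_iff_dvd] using hndvd
    rw [if_neg hmod]
    exact pvTrialB_true n (d + 2) (fun m hm hmo hmm => h m (by omega) hmo hmm) (by omega)
  · rw [if_neg hg]
termination_by (n + 1 - d).toNat
decreasing_by exact pvTrialDec n d hg

-- Oddness transfers along divisibility of an odd number.
theorem pvOddDvd (n d : Int) (hodd : n % 2 = 1) (hdvd : d ∣ n) : d % 2 = 1 := by
  by_cases he : d % 2 = 0
  · exfalso
    have h2n : (2 : Int) ∣ n := (Int.dvd_of_emod_eq_zero he).trans hdvd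
    have := Int.emod_emod_of_dvd n (dvd_refl 2)
    omega
  · omega

-- B's test, for odd n ≥ 3, decides pvNoDiv too.
theorem pvIsOddPrimeB_iff (n : Int) (h3 : 3 ≤ n) (hodd : n % 2 = 1) :
    pvIsOddPrimeB n = true ↔ pvNoDiv n := by
  have hm2 : PySem.Int.mod n 2 = n % 2 := PySem.Int.mod_eq_emod_of_pos (by norm_num)
  have hcond : ¬ (n < 3 ∨ (PySem.Int.mod n 2 == 0) = true) := by
    simp [hodd]; omega
  rw [pvIsOddPrimeB, if_neg hcond]
  constructor
  · intro h d hd2 hdn hdvd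
    have hdodd : d % 2 = 1 := pvOddDvd n d hodd hdvd
    obtain ⟨c, hc⟩ := hdvd
    have hc2 : 2 ≤ c := by
      by_contra hcon
      have h1 : c ≤ 1 := by omega
      have h' : d * c ≤ d * 1 := mul_le_mul_of_nonneg_left h1 (by omega)
      rw [mul_one] at h'
      omega
    have hcdvd : c ∣ n := ⟨d, by rw [hc]; ring⟩
    have hcodd : c % 2 = 1 := pvOddDvd n c hodd hcdvd
    by_cases hdd : d * d ≤ n
    · have hf := pvTrialB_false n 3 d (by norm_num) (by norm_num) hdodd (by omega) hdd ⟨c, hc⟩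
      simp [hf] at h
    · rw [not_le] at hdd
      have hcd : c < d := by
        have hlt : d * c < d * d := by rw [← hc]; exact hdd
        exact lt_of_mul_lt_mul_left hlt (by omega)
      have hccn : c * c ≤ n := by
        nlinarith [mul_pos (show (0:Int) < c by omega) (show (0:Int) < d - c by omega), hc]
      have hf := pvTrialB_false n 3 c (by norm_num) (by norm_num) hcodd (by omega) hccn hcdvd
      simp [hf] at h
  · intro hN
    apply pvTrialB_true n 3 ?_ (by norm_num)
    intro m hm3 hmodd hmm hdvd
    have hmn : m < n := by nlinarith
    exact hN m (by omega) hmn hdvd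

-- Pointwise: A's filter condition = B's filter condition.
theorem pvPred_iff (num : Int) :
    (num > 1 ∧ PySem.Int.mod num 2 ≠ 0 ∧ pvIsPrimeA num = true) ↔ pvIsOddPrimeB num = true := by
  have hm2 : PySem.Int.mod num 2 = num % 2 := PySem.Int.mod_eq_emod_of_pos (by norm_num)
  by_cases h3 : 3 ≤ num
  · by_cases hodd : num % 2 = 1
    · rw [pvIsOddPrimeB_iff num h3 hodd]
      constructor
      · rintro ⟨-, -, hA⟩
        exact (pvIsPrimeA_iff num h3).mp hA
      · intro hN
        exact ⟨by omega, by rw [hm2]; omega, (pvIsPrimeA_iff num h3).mpr hN⟩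
    · have he : num % 2 = 0 := by omega
      have hBfalse : pvIsOddPrimeB num = false := by
        rw [pvIsOddPrimeB, if_pos (Or.inr (by simp [he]))]
      rw [hBfalse]
      simp only [Bool.false_eq_true, iff_false]
      rintro ⟨-, hne, -⟩
      exact hne (by rw [hm2, he])
  · have hBfalse : pvIsOddPrimeB num = false := by
      rw [pvIsOddPrimeB, if_pos (Or.inl (by omega))]
    rw [hBfalse]
    simp only [Bool.false_eq_true, iff_false]
    rintro ⟨hgt, hne, -⟩
    have h2 : num = 2 := by omega
    subst h2
    exact hne (by decide)

-- A's loop with counter 1 = "B finds one more match".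
theorem pvLoopA_one (arr : List Int) : pvLoopA arr 1 = (pvFindB arr).isSome := by
  induction arr with
  | nil => simp [pvLoopA, pvFindB]
  | cons x xs ih =>
    by_cases hx : pvIsOddPrimeB x = true
    · rw [pvLoopA, if_pos (pvPred_iff x |>.mpr hx)]
      simp [pvFindB, hx]
    · rw [pvLoopA, if_neg (fun hc => hx (pvPred_iff x |>.mp hc))]
      simp only [pvFindB, hx, Bool.false_eq_true, ite_false]
      exact ih

theorem pvLoopA_zero (arr : List Int) : pvLoopA arr 0 = contains_two_odd_primes_alt arr := by
  induction arr with
  | nil => simp [pvLoopA, contains_two_odd_primes_alt, pvFindB]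
  | cons x xs ih =>
    by_cases hx : pvIsOddPrimeB x = true
    · rw [pvLoopA, if_pos (pvPred_iff x |>.mpr hx)]
      simp only [contains_two_odd_primes_alt, pvFindB, hx, ite_true]
      norm_num
      exact pvLoopA_one xs
    · rw [pvLoopA, if_neg (fun hc => hx (pvPred_iff x |>.mp hc))]
      rw [ih]
      simp [contains_two_odd_primes_alt, pvFindB, hx]

-- ===== VERDICT (by name: the statement is the Claim_ definition above) =====
theorem contains_two_odd_primes_spec : Claim_equal_contains_two_odd_primes := by
  intro arr _
  show contains_two_odd_primes arr = contains_two_odd_primes_alt arr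
  exact pvLoopA_zero arr
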